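-- pv_equiv track=rewrite | github.com/shahanarif1/AI-SOC-Agent | src/wazuh_mcp_server/prompt_enhancement/pipelines.py | _analyze_port_protocols
-- ===== SOURCE A (Python) =====
-- from typing import Dict, Any, Optional, List
--
-- def _analyze_port_protocols(ports: List[Dict[str, Any]]) -> Dict[str, int]:
--     """Analyze port protocol distribution."""
--     distribution = {'tcp': 0, 'udp': 0, 'other': 0}
--
--     for port in ports:
--         protocol = port.get('protocol', '').lower()
--         if protocol in distribution:
--             distribution[protocol] += 1
--         else:
--             distribution['other'] += 1
--
--     return distribution
-- ===== SOURCE B (Python) =====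
-- from typing import Dict, Any, List
--
-- def _analyze_port_protocols(ports: List[Dict[str, Any]]) -> Dict[str, int]:
--     """Analyze port protocol distribution."""
--     def go(lo: int, hi: int):
--         # divide-and-conquer reduction over ports[lo:hi], returning (tcp, udp, other)
--         if hi - lo == 0:
--             return (0, 0, 0)
--         if hi - lo == 1:
--             protocol = ports[lo].get('protocol', '').lower()
--             if protocol == 'tcp':
--                 return (1, 0, 0)
--             if protocol == 'udp':
--                 return (0, 1, 0)
--             return (0, 0, 1)
--         mid = (lo + hi) // 2
--         t1, u1, o1 = go(lo, mid)
--         t2, u2, o2 = go(mid, hi)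
--         return (t1 + t2, u1 + u2, o1 + o2)
--
--     tcp, udp, other = go(0, len(ports))
--     return {'tcp': tcp, 'udp': udp, 'other': other}
-- ===== Notes on version B (the rewrite author's own statement) =====
-- stated objective: alternative
-- what changed: Replaces the sequential mutable-dict accumulation with a divide-and-conquer tree reduction: the list is split in halves recursively, each leaf classifies one port into a (tcp,udp,other) triple, and triples are merged by componentwise addition; no dict membership test and no running accumulator.
import Mathlib
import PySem

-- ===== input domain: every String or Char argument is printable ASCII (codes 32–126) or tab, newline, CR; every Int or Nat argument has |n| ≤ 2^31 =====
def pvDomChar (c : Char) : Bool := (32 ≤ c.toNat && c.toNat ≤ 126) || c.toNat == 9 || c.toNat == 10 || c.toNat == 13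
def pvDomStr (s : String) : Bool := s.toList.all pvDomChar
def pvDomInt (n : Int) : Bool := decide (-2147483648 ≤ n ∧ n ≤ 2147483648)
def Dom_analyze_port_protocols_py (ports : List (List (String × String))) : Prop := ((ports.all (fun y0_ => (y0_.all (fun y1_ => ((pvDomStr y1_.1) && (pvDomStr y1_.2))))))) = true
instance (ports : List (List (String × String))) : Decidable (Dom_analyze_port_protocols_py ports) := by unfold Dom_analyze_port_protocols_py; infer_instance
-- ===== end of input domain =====

-- B replaces A's sequential mutable-dict loop with a divide-and-conquer tree reduction merging (tcp,udp,other) triples (alternative decomposition).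


-- ===== PORT A =====
def analyze_port_protocols_py (ports : List (List (String × String))) : List (String × Int) :=
  (ports.foldl
    (fun (distribution : PySem.Dict String Int) port =>
      let protocol := PySem.Str.lower (PySem.Dict.getD (PySem.Dict.mk port) "protocol" "")
      if (PySem.Dict.get? distribution protocol).isSome then
        PySem.Dict.modify distribution protocol 0 (fun v => v + 1)
      else
        PySem.Dict.modify distribution "other" 0 (fun v => v + 1))
    (PySem.Dict.mk [("tcp", 0), ("udp", 0), ("other", 0)])).items

-- ===== PORT B =====
-- Source B's go(lo,hi) works on the slice ports[lo:hi]; its Lean transcription recurses on that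
-- slice directly, splitting at mid = length/2 exactly as (lo+hi)//2 - lo = (hi-lo)//2 does.
def pvGo (l : List (List (String × String))) : Int × Int × Int :=
  match l with
  | [] => (0, 0, 0)
  | [p] =>
      let protocol := PySem.Str.lower (PySem.Dict.getD (PySem.Dict.mk p) "protocol" "")
      if protocol = "tcp" then (1, 0, 0)
      else if protocol = "udp" then (0, 1, 0)
      else (0, 0, 1)
  | a :: b :: rest =>
      let l' := a :: b :: rest
      let mid := l'.length / 2
      let x := pvGo (l'.take mid)
      let y := pvGo (l'.drop mid)
      (x.1 + y.1, x.2.1 + y.2.1, x.2.2 + y.2.2)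
termination_by l.length
decreasing_by
  · simp; omega
  · simp; omega

def analyze_port_protocols_py_alt (ports : List (List (String × String))) : List (String × Int) :=
  let r := pvGo ports
  [("tcp", r.1), ("udp", r.2.1), ("other", r.2.2)]

-- ===== PRECONDITION & SPEC =====
def Spec_analyze_port_protocols_py (ports : List (List (String × String))) (out : List (String × Int)) : Prop := out = analyze_port_protocols_py_alt ports
instance (ports : List (List (String × String))) (out : List (String × Int)) : Decidable (Spec_analyze_port_protocols_py ports out) := by unfold Spec_analyze_port_protocols_py; infer_instance

-- ===== CLAIM (what is proved, stated in full; the proofs are below) =====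
def Claim_equal_analyze_port_protocols_py : Prop := ∀ (ports : List (List (String × String))), Dom_analyze_port_protocols_py ports → Spec_analyze_port_protocols_py ports (analyze_port_protocols_py ports)

-- ===== LEMMAS AND PROOFS =====
-- one step of A's loop on the canonical 3-key dict, by cases on the key
lemma pvA_step (k : String) (t u o : Int) :
    (if (PySem.Dict.get? (PySem.Dict.mk [("tcp", t), ("udp", u), ("other", o)]) k).isSome then
       PySem.Dict.modify (PySem.Dict.mk [("tcp", t), ("udp", u), ("other", o)]) k 0 (fun v => v + 1)
     else
       PySem.Dict.modify (PySem.Dict.mk [("tcp", t), ("udp", u), ("other", o)]) "other" 0 (fun v => v + 1))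
    = PySem.Dict.mk [("tcp", if k = "tcp" then t + 1 else t),
                     ("udp", if k = "udp" then u + 1 else u),
                     ("other", if k = "tcp" ∨ k = "udp" then o else o + 1)] := by
  by_cases h1 : k = "tcp"
  · subst h1
    simp [PySem.Dict.get?, PySem.Dict.modify, PySem.Dict.getD, PySem.Dict.insert, PySem.Dict.contains]
  · by_cases h2 : k = "udp"
    · subst h2
      simp [PySem.Dict.get?, PySem.Dict.modify, PySem.Dict.getD, PySem.Dict.insert, PySem.Dict.contains]
    · by_cases h3 : k = "other"
      · subst h3
        simp [PySem.Dict.get?, PySem.Dict.modify, PySem.Dict.getD, PySem.Dict.insert,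
          PySem.Dict.contains, Ne.symm h1, Ne.symm h2]
      · simp [PySem.Dict.get?, PySem.Dict.modify, PySem.Dict.getD, PySem.Dict.insert,
          PySem.Dict.contains, h1, h2, Ne.symm h1, Ne.symm h2, Ne.symm h3]

-- A's loop, started from the canonical 3-key dict, expressed by counts of the lowercased protocols
lemma pvA_foldl (l : List (List (String × String))) (t u o : Int) :
    l.foldl
      (fun (distribution : PySem.Dict String Int) port =>
        let protocol := PySem.Str.lower (PySem.Dict.getD (PySem.Dict.mk port) "protocol" "")
        if (PySem.Dict.get? distribution protocol).isSome then
          PySem.Dict.modify distribution protocol 0 (fun v => v + 1)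
        else
          PySem.Dict.modify distribution "other" 0 (fun v => v + 1))
      (PySem.Dict.mk [("tcp", t), ("udp", u), ("other", o)])
    = PySem.Dict.mk
       [("tcp", t + ((l.map (fun p => PySem.Str.lower (PySem.Dict.getD (PySem.Dict.mk p) "protocol" ""))).count "tcp" : Int)),
        ("udp", u + ((l.map (fun p => PySem.Str.lower (PySem.Dict.getD (PySem.Dict.mk p) "protocol" ""))).count "udp" : Int)),
        ("other", o + ((l.length : Int)
            - ((l.map (fun p => PySem.Str.lower (PySem.Dict.getD (PySem.Dict.mk p) "protocol" ""))).count "tcp" : Int)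
            - ((l.map (fun p => PySem.Str.lower (PySem.Dict.getD (PySem.Dict.mk p) "protocol" ""))).count "udp" : Int)))] := by
  induction l generalizing t u o with
  | nil => simp
  | cons p l ih =>
    simp only [List.foldl_cons, List.map_cons, List.count_cons, List.length_cons]
    generalize PySem.Str.lower (PySem.Dict.getD (PySem.Dict.mk p) "protocol" "") = k
    rw [pvA_step, ih]
    by_cases h1 : k = "tcp"
    · simp [h1]; ring
    · by_cases h2 : k = "udp"
      · simp [h2]
        exact ⟨by ring, by ring⟩
      · simp [h1, h2]; ring

-- B's tree reduction computes exactly the (tcp, udp, rest) counts of the lowercased protocols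
lemma pvGo_spec (l : List (List (String × String))) :
    pvGo l =
      (((l.map (fun p => PySem.Str.lower (PySem.Dict.getD (PySem.Dict.mk p) "protocol" ""))).count "tcp" : Int),
       ((l.map (fun p => PySem.Str.lower (PySem.Dict.getD (PySem.Dict.mk p) "protocol" ""))).count "udp" : Int),
       (l.length : Int)
         - ((l.map (fun p => PySem.Str.lower (PySem.Dict.getD (PySem.Dict.mk p) "protocol" ""))).count "tcp" : Int)
         - ((l.map (fun p => PySem.Str.lower (PySem.Dict.getD (PySem.Dict.mk p) "protocol" ""))).count "udp" : Int)) := by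
  induction l using pvGo.induct with
  | case1 => simp [pvGo]
  | case2 p prot h1 => simp only [pvGo]; simp only [prot] at h1; simp [h1]
  | case3 p prot h1 h2 => simp only [pvGo]; simp only [prot] at h1 h2; simp [h2]
  | case4 p prot h1 h2 => simp only [pvGo]; simp only [prot] at h1 h2; simp [h1, h2]
  | case5 a b rest l' mid ih1 ih2 =>
    rw [pvGo]
    simp only [l', mid] at ih1 ih2 ⊢
    rw [ih1, ih2]
    have hsplit := List.take_append_drop ((a :: b :: rest).length / 2) (a :: b :: rest)
    conv_rhs => rw [← hsplit]
    simp only [List.map_append, List.count_append, List.length_append]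
    refine Prod.ext ?_ (Prod.ext ?_ ?_) <;> simp <;> try (push_cast; ring)

-- ===== VERDICT (by name: the statement is the Claim_ definition above) =====
theorem analyze_port_protocols_py_spec : Claim_equal_analyze_port_protocols_py := by
  intro ports _
  show analyze_port_protocols_py ports = analyze_port_protocols_py_alt ports
  simp only [analyze_port_protocols_py, analyze_port_protocols_py_alt, pvA_foldl, pvGo_spec,
    zero_add]
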